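-- pv_equiv track=rewrite | github.com/benhuang3/diamondhacks2026 | src/backend/workers/report_generator.py | _score_from_findings
-- ===== SOURCE A (Python) =====
-- from typing import Any
--
-- def _score_from_findings(findings: list[dict[str, Any]]) -> dict[str, int]:
--     high = sum(1 for f in findings if f.get("severity") == "high")
--     med = sum(1 for f in findings if f.get("severity") == "medium")
--     low = sum(1 for f in findings if f.get("severity") == "low")
--     penalty = high * 12 + med * 6 + low * 2
--     base = max(35, 95 - penalty)
--     # spread across the three axes
--     a11y = max(20, base - sum(1 for f in findings if f.get("category") == "a11y") * 3)
--     ux = max(20, base - sum(1 for f in findings if f.get("category") == "ux") * 3)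
--     flow = max(20, base - sum(1 for f in findings if f.get("category") == "nav") * 4)
--     return {"accessibility": int(a11y), "ux": int(ux), "flow": int(flow)}
-- ===== SOURCE B (Python) =====
-- from typing import Any
--
-- def _score_from_findings(findings: list[dict[str, Any]]) -> dict[str, int]:
--     high = med = low = a11y_n = ux_n = nav_n = 0
--     for f in findings:
--         sev = f.get("severity")
--         if sev == "high":
--             high += 1
--         elif sev == "medium":
--             med += 1
--         elif sev == "low":
--             low += 1
--         cat = f.get("category")
--         if cat == "a11y":
--             a11y_n += 1
--         elif cat == "ux":
--             ux_n += 1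
--         elif cat == "nav":
--             nav_n += 1
--     base = max(35, 95 - (high * 12 + med * 6 + low * 2))
--     return {
--         "accessibility": max(20, base - a11y_n * 3),
--         "ux": max(20, base - ux_n * 3),
--         "flow": max(20, base - nav_n * 4),
--     }
-- ===== Notes on version B (the rewrite author's own statement) =====
-- stated objective: alternative
-- what changed: Six separate comprehension scans over findings are replaced by a single counting loop that reads severity and category once per finding and maintains six counters, from which the axes are computed.
import Mathlib
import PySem

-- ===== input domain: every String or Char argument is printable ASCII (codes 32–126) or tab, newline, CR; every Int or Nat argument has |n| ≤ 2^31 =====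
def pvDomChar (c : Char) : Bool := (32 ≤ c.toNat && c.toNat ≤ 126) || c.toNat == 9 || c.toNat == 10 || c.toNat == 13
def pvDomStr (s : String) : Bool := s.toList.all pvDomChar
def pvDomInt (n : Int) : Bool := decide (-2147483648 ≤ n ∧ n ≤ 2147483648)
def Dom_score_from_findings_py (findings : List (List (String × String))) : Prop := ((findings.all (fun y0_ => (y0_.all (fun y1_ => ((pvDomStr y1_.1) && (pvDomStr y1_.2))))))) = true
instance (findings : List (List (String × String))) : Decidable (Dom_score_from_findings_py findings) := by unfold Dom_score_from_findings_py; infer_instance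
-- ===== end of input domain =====

-- B replaces A's six comprehension scans by a single counting loop over findings (objective: alternative decomposition).

-- ===== PORT A =====
def score_from_findings_py (findings : List (List (String × String))) : List (String × Int) :=
  let high := findings.foldl (fun a f => a + (if PySem.Dict.get? (PySem.Dict.mk f) "severity" = some "high" then 1 else 0)) (0 : Int)
  let med := findings.foldl (fun a f => a + (if PySem.Dict.get? (PySem.Dict.mk f) "severity" = some "medium" then 1 else 0)) (0 : Int)
  let low := findings.foldl (fun a f => a + (if PySem.Dict.get? (PySem.Dict.mk f) "severity" = some "low" then 1 else 0)) (0 : Int)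
  let penalty := high * 12 + med * 6 + low * 2
  let base := max 35 (95 - penalty)
  let a11y := max 20 (base - (findings.foldl (fun a f => a + (if PySem.Dict.get? (PySem.Dict.mk f) "category" = some "a11y" then 1 else 0)) (0 : Int)) * 3)
  let ux := max 20 (base - (findings.foldl (fun a f => a + (if PySem.Dict.get? (PySem.Dict.mk f) "category" = some "ux" then 1 else 0)) (0 : Int)) * 3)
  let flow := max 20 (base - (findings.foldl (fun a f => a + (if PySem.Dict.get? (PySem.Dict.mk f) "category" = some "nav" then 1 else 0)) (0 : Int)) * 4)
  [("accessibility", a11y), ("ux", ux), ("flow", flow)]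

-- ===== PORT B =====
-- the fused counting loop of Source B: state = (high, med, low, a11y_n, ux_n, nav_n)
def sfLoop : List (List (String × String)) → Int × Int × Int × Int × Int × Int → Int × Int × Int × Int × Int × Int
  | [], st => st
  | f :: rest, (h, m, l, a, u, n) =>
    let sev := PySem.Dict.get? (PySem.Dict.mk f) "severity"
    let (h, m, l) :=
      if sev = some "high" then (h + 1, m, l)
      else if sev = some "medium" then (h, m + 1, l)
      else if sev = some "low" then (h, m, l + 1)
      else (h, m, l)
    let cat := PySem.Dict.get? (PySem.Dict.mk f) "category"
    let (a, u, n) :=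
      if cat = some "a11y" then (a + 1, u, n)
      else if cat = some "ux" then (a, u + 1, n)
      else if cat = some "nav" then (a, u, n + 1)
      else (a, u, n)
    sfLoop rest (h, m, l, a, u, n)

def score_from_findings_py_alt (findings : List (List (String × String))) : List (String × Int) :=
  let (h, m, l, a, u, n) := sfLoop findings (0, 0, 0, 0, 0, 0)
  let base := max 35 (95 - (h * 12 + m * 6 + l * 2))
  [("accessibility", max 20 (base - a * 3)), ("ux", max 20 (base - u * 3)), ("flow", max 20 (base - n * 4))]

-- ===== PRECONDITION & SPEC =====
def Spec_score_from_findings_py (findings : List (List (String × String))) (out : List (String × Int)) : Prop := out = score_from_findings_py_alt findings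
instance (findings : List (List (String × String))) (out : List (String × Int)) : Decidable (Spec_score_from_findings_py findings out) := by unfold Spec_score_from_findings_py; infer_instance

-- ===== CLAIM (what is proved, stated in full; the proofs are below) =====
def Claim_equal_score_from_findings_py : Prop := ∀ (findings : List (List (String × String))), Dom_score_from_findings_py findings → Spec_score_from_findings_py findings (score_from_findings_py findings)

-- ===== LEMMAS AND PROOFS =====

-- counting helper for the proofs
def sfCnt (key val : String) : List (List (String × String)) → Int
  | [] => 0
  | f :: rest => (if PySem.Dict.get? (PySem.Dict.mk f) key = some val then 1 else 0) + sfCnt key val rest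

theorem sfCnt_foldl (key val : String) (fs : List (List (String × String))) (c : Int) :
    fs.foldl (fun a f => a + (if PySem.Dict.get? (PySem.Dict.mk f) key = some val then 1 else 0)) c = c + sfCnt key val fs := by
  induction fs generalizing c with
  | nil => simp [sfCnt]
  | cons f rest ih => simp [sfCnt, List.foldl, ih]; ring

theorem sfLoop_eq (fs : List (List (String × String))) (h m l a u n : Int) :
    sfLoop fs (h, m, l, a, u, n) =
      (h + sfCnt "severity" "high" fs, m + sfCnt "severity" "medium" fs, l + sfCnt "severity" "low" fs,
       a + sfCnt "category" "a11y" fs, u + sfCnt "category" "ux" fs, n + sfCnt "category" "nav" fs) := by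
  induction fs generalizing h m l a u n with
  | nil => simp [sfLoop, sfCnt]
  | cons f rest ih =>
    simp only [sfLoop, sfCnt]
    split_ifs <;> simp_all <;> omega

-- ===== VERDICT (by name: the statement is the Claim_ definition above) =====
theorem score_from_findings_py_spec : Claim_equal_score_from_findings_py := by
  intro findings _
  unfold Spec_score_from_findings_py score_from_findings_py score_from_findings_py_alt
  simp only [sfCnt_foldl, sfLoop_eq, zero_add]
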